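-- pv_equiv track=rewrite | github.com/ASSERT-KTH/Mokav | experiments/pynguin/c4b/return-lst/generated_tests/src_962/6/src_962.py | func
-- ===== SOURCE A (Python) =====
-- def func(*args):
-- 	ret_values = []
--
-- 	mat = list(map(int, args[0].split()))
-- 	sat = [0]
-- 	d = {}
-- 	for i in mat:
-- 	    if (i in d):
-- 	        d[i] += 1
-- 	    else:
-- 	        d[i] = 1
-- 	for j in d:
-- 	    if (d[j] > 3):
-- 	        d[j] = 3
-- 	    if (d[j] > 1):
-- 	        sat.append((j * d[j]))
-- 	ret_values.append((sum(mat) - max(sat)))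
--
-- 	return ret_values
-- ===== SOURCE B (Python) =====
-- def func(*args):
--     nums = sorted(map(int, args[0].split()))
--     best = 0
--     prev = None
--     run = 0
--     for v in nums:
--         if v == prev:
--             run += 1
--         else:
--             if run >= 2:
--                 best = max(best, prev * min(run, 3))
--             prev = v
--             run = 1
--     if run >= 2:
--         best = max(best, prev * min(run, 3))
--     return [sum(nums) - best]
-- ===== Notes on version B (the rewrite author's own statement) =====
-- stated objective: alternative
-- what changed: Replaces A's hash-count dict and sat candidate list with a sort-then-scan: sort the parsed integers once, sweep consecutive equal runs with a (best, prev, run) accumulator, flushing value*min(run,3) into a running max (initialized 0, reproducing the sat=[0] floor) at each run boundary.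
import Mathlib
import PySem

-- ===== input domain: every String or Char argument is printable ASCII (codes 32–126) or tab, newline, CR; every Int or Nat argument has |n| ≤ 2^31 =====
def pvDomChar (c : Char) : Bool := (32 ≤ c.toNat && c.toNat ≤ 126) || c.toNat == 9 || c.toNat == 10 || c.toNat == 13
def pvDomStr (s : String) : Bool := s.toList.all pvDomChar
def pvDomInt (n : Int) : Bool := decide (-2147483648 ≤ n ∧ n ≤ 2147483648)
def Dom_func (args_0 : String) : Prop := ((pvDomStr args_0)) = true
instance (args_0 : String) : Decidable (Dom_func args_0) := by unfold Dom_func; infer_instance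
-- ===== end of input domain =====

-- B replaces A's hash-count dict + sat candidate list with a sort-then-scan over consecutive equal runs (no counting structure at all); objective: alternative, not faster.

-- ===== PORT A =====
def func (args_0 : String) : List Int :=
  match (PySem.Str.split₀ args_0).mapM PySem.Int.ofStr? with
  | none => []   -- int() raised ValueError: excluded by Pre_func
  | some mat =>
    -- first loop: d[i] += 1 / d[i] = 1
    let d := mat.foldl (fun d i =>
        if d.contains i then d.insert i (d.getD i 0 + 1) else d.insert i 1)
      PySem.Dict.empty
    -- second loop: for j in d: cap at 3, then maybe append j*d[j] to sat (= [0] initially)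
    let p := d.keys.foldl (fun (p : List Int × PySem.Dict Int Int) j =>
        let d1 := if 3 < p.2.getD j 0 then p.2.insert j 3 else p.2
        (if 1 < d1.getD j 0 then p.1 ++ [j * d1.getD j 0] else p.1, d1))
      ([0], d)
    match PySem.List.max? p.1 (fun y => y) with
    | some m => [mat.sum - m]
    | none => []   -- unreachable: sat starts [0]

-- ===== PORT B =====
-- one pass over the sorted numbers: state (best, prev, run); flush the run at each
-- value change and once at the end.  prev is None only while run = 0, so the Python flush
-- 'prev * min(run, 3)' never reads None; the port reads prev.getD 0 there.
def func_alt (args_0 : String) : List Int :=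
  match (PySem.Str.split₀ args_0).mapM PySem.Int.ofStr? with
  | none => []   -- int() raised ValueError: excluded by Pre_func
  | some nums0 =>
    let nums := PySem.List.sorted nums0 (fun x => x) false
    let st := nums.foldl (fun (st : Int × Option Int × Int) v =>
        if st.2.1 = some v then (st.1, st.2.1, st.2.2 + 1)
        else ((if 2 ≤ st.2.2 then max st.1 (st.2.1.getD 0 * min st.2.2 3) else st.1), some v, 1))
      (0, none, 0)
    let best := if 2 ≤ st.2.2 then max st.1 (st.2.1.getD 0 * min st.2.2 3) else st.1
    [nums.sum - best]

-- ===== PRECONDITION & SPEC =====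
-- Pre_ excludes exactly the inputs where int() raises ValueError on some whitespace-split token
-- (both A and B raise there).
def Pre_func (args_0 : String) : Prop :=
  ∀ t ∈ PySem.Str.split₀ args_0, (PySem.Int.ofStr? t).isSome = true
instance (args_0 : String) : Decidable (Pre_func args_0) := by unfold Pre_func; infer_instance
def pvWitness_func : String := "1 2 2 3"

def Spec_func (args_0 : String) (out : List Int) : Prop := out = func_alt args_0
instance (args_0 : String) (out : List Int) : Decidable (Spec_func args_0 out) := by
  unfold Spec_func; infer_instance

-- ===== CLAIM (what is proved, stated in full; the proofs are below) =====
def Claim_equal_func : Prop :=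
  ∀ (args_0 : String), Dom_func args_0 → Pre_func args_0 → Spec_func args_0 (func args_0)

-- ===== LEMMAS AND PROOFS =====

-- the per-distinct-value max step (counts taken in `mat`)
def pvStep (mat : List Int) : Int → Int → Int := fun b v =>
  if 2 ≤ ((mat.count v : Int)) then max b (v * min ((mat.count v : Int)) 3) else b

-- list-building version of A's second loop (d already known to hold the counts)
def pvLF (mat : List Int) : List Int → Int → List Int := fun sat j =>
  if 2 ≤ ((mat.count j : Int)) then sat ++ [j * min ((mat.count j : Int)) 3] else sat

-- distinct values in order of first appearance, by repeated filtering
def pvDistinct : List Int → List Int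
  | [] => []
  | x :: t => x :: pvDistinct (t.filter (fun y => y ≠ x))
  termination_by l => l.length
  decreasing_by
    simp only [List.length_cons, List.length_unattach]
    exact Nat.lt_succ_of_le (le_trans (List.length_filter_le _ _) (by simp))

lemma pvDistinct_nil : pvDistinct [] = [] := by simp [pvDistinct]

lemma pvDistinct_cons (x : Int) (t : List Int) :
    pvDistinct (x :: t) = x :: pvDistinct (t.filter (fun y => y ≠ x)) := by
  simp [pvDistinct]

-- induction along pvDistinct's recursion (the definition is well-founded, so we roll our own)
lemma pvDistinct_ind (P : List Int → Prop) (nil : P [])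
    (cons : ∀ x t, P (t.filter (fun y => y ≠ x)) → P (x :: t)) : ∀ l, P l := by
  have key : ∀ n (l : List Int), l.length ≤ n → P l := by
    intro n
    induction n with
    | zero =>
      intro l hl
      have : l = [] := List.length_eq_zero_iff.mp (Nat.le_zero.mp hl)
      exact this ▸ nil
    | succ n ih =>
      intro l hl
      cases l with
      | nil => exact nil
      | cons x t =>
        refine cons x t (ih _ ?_)
        have h1 : (t.filter (fun y => y ≠ x)).length ≤ t.length := List.length_filter_le _ _
        have h2 : t.length ≤ n := by simpa using Nat.succ_le_succ_iff.mp hl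
        omega
  exact fun l => key l.length l le_rfl

-- B's run flush
def pvFlush (b : Int) (p : Option Int) (r : Int) : Int :=
  if 2 ≤ r then max b (p.getD 0 * min r 3) else b

-- B's loop body
def pvBStep : (Int × Option Int × Int) → Int → (Int × Option Int × Int) := fun st v =>
  if st.2.1 = some v then (st.1, st.2.1, st.2.2 + 1)
  else (pvFlush st.1 st.2.1 st.2.2, some v, 1)

-- B's scan result, fully applied (no lets)
def pvBFinal (s : List Int) : Int :=
  pvFlush (s.foldl pvBStep (0, none, 0)).1 (s.foldl pvBStep (0, none, 0)).2.1
    (s.foldl pvBStep (0, none, 0)).2.2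

-- run-recursion form of B's scan
def pvRunsAux : Int → Int → List Int → Int → Int
  | v, r, [], b => pvFlush b (some v) r
  | v, r, x :: t, b =>
    if x = v then pvRunsAux v (r + 1) t b else pvRunsAux x 1 t (pvFlush b (some v) r)

-- ---- A side ----

lemma pv_getD_absent (d : PySem.Dict Int Int) (i : Int) (h : d.contains i = false) :
    d.getD i 0 = 0 := by
  simp [PySem.Dict.getD, (PySem.Dict.get?_eq_none_iff_contains d i).mpr h]

lemma pv_build_eq (mat : List Int) :
    mat.foldl (fun d i =>
        if d.contains i then d.insert i (d.getD i 0 + 1) else d.insert i 1)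
      PySem.Dict.empty = PySem.Dict.counter mat := by
  rw [PySem.List.foldl_congr_mem mat _ (fun d i => d.insert i (d.getD i 0 + 1)) _ ?_]
  · exact PySem.Dict.foldl_insert_getD_add_one_eq_counter mat
  · intro d i _
    by_cases h : d.contains i
    · simp [h]
    · simp only [Bool.not_eq_true] at h
      simp [h, pv_getD_absent d i h]

lemma pv_sat_fold (mat : List Int) :
    ∀ (ks : List Int) (d : PySem.Dict Int Int) (sat0 : List Int),
      ks.Nodup → (∀ j ∈ ks, d.getD j 0 = (mat.count j : Int)) →
      (ks.foldl (fun (p : List Int × PySem.Dict Int Int) j =>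
        let d1 := if 3 < p.2.getD j 0 then p.2.insert j 3 else p.2
        (if 1 < d1.getD j 0 then p.1 ++ [j * d1.getD j 0] else p.1, d1)) (sat0, d)).1
      = ks.foldl (pvLF mat) sat0 := by
  intro ks
  induction ks with
  | nil => intro d sat0 _ _; simp
  | cons j t ih =>
    intro d sat0 hnd h
    have hj : d.getD j 0 = (mat.count j : Int) := h j (by simp)
    have hjt : j ∉ t := (List.nodup_cons.mp hnd).1
    have hndt : t.Nodup := (List.nodup_cons.mp hnd).2
    simp only [List.foldl_cons]
    set d1 := if 3 < d.getD j 0 then d.insert j 3 else d with hd1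
    have hd1j : d1.getD j 0 = min ((mat.count j : Int)) 3 := by
      rw [hd1]; split_ifs with hc
      · rw [PySem.Dict.getD_insert_self]; omega
      · omega
    have hd1t : ∀ j' ∈ t, d1.getD j' 0 = (mat.count j' : Int) := by
      intro j' hj'
      have hne : j' ≠ j := fun he => hjt (he ▸ hj')
      rw [hd1]; split_ifs with hc
      · rw [PySem.Dict.getD_insert_of_ne d 3 0 hne]; exact h j' (by simp [hj'])
      · exact h j' (by simp [hj'])
    rw [ih d1 _ hndt hd1t]
    congr 1
    rw [hd1j]
    unfold pvLF
    have hcnt : (0 : Int) ≤ (mat.count j : Int) := by positivity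
    split_ifs with h1 h2 h2 <;> first
      | rfl
      | omega

lemma pv_cons_fold (mat : List Int) :
    ∀ (ks : List Int) (x : Int) (s : List Int),
      ks.foldl (pvLF mat) (x :: s) = x :: ks.foldl (pvLF mat) s := by
  intro ks
  induction ks with
  | nil => intro x s; rfl
  | cons j t ih =>
    intro x s
    simp only [List.foldl_cons]
    have : pvLF mat (x :: s) j = x :: pvLF mat s j := by
      unfold pvLF; split_ifs <;> simp
    rw [this, ih]

lemma pv_max_fold (mat : List Int) :
    ∀ (ks : List Int) (b : Int) (s : List Int),
      (ks.foldl (pvLF mat) s).foldl max b = ks.foldl (pvStep mat) (s.foldl max b) := by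
  intro ks
  induction ks with
  | nil => intro b s; rfl
  | cons j t ih =>
    intro b s
    simp only [List.foldl_cons]
    rw [ih]
    congr 1
    unfold pvLF pvStep
    split_ifs with hc
    · simp [List.foldl_append]
    · rfl

lemma pv_step_rc (mat : List Int) : RightCommutative (pvStep mat) := by
  constructor
  intro b v w
  unfold pvStep
  split_ifs <;> simp [max_right_comm]

-- ---- B side ----

lemma pv_mem_pvDistinct : ∀ (l : List Int) (u : Int), u ∈ pvDistinct l ↔ u ∈ l := by
  refine pvDistinct_ind _ (by simp [pvDistinct_nil]) ?_
  intro x t ih u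
  rw [pvDistinct_cons]
  by_cases hux : u = x
  · simp [hux]
  · rw [List.mem_cons, ih u, List.mem_filter]
    simp [hux]

lemma pv_nodup_pvDistinct : ∀ (l : List Int), (pvDistinct l).Nodup := by
  refine pvDistinct_ind _ (by simp [pvDistinct_nil]) ?_
  intro x t ih
  rw [pvDistinct_cons]
  refine List.nodup_cons.mpr ⟨?_, ih⟩
  intro hx
  have := (pv_mem_pvDistinct _ x).mp hx
  simp [List.mem_filter] at this

-- B's foldl is pvRunsAux
lemma pv_fold_runsAux :
    ∀ (s : List Int) (b v : Int) (r : Int),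
      pvFlush (s.foldl pvBStep (b, some v, r)).1 (s.foldl pvBStep (b, some v, r)).2.1
        (s.foldl pvBStep (b, some v, r)).2.2 = pvRunsAux v r s b := by
  intro s
  induction s with
  | nil => intro b v r; rfl
  | cons x t ih =>
    intro b v r
    simp only [List.foldl_cons]
    by_cases hx : x = v
    · rw [pvRunsAux, if_pos hx]
      have : pvBStep (b, some v, r) x = (b, some v, r + 1) := by
        simp [pvBStep, hx]
      rw [this]
      exact ih b v (r + 1)
    · rw [pvRunsAux, if_neg hx]
      have hvx : v ≠ x := fun h => hx h.symm
      have : pvBStep (b, some v, r) x = (pvFlush b (some v) r, some x, 1) := by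
        simp [pvBStep, hvx]
      rw [this]
      exact ih (pvFlush b (some v) r) x 1

-- the run recursion over a sorted tail computes the per-distinct-value fold
lemma pv_runsAux_eq :
    ∀ (s : List Int) (v r b : Int), s.Pairwise (· ≤ ·) →
      (∀ x ∈ s, v ≤ x) → 1 ≤ r →
      pvRunsAux v r s b
        = (pvDistinct (s.filter (fun y => y ≠ v))).foldl
            (fun b u => if 2 ≤ ((s.count u : Int)) then max b (u * min ((s.count u : Int)) 3) else b)
            (pvFlush b (some v) (r + (s.count v : Int))) := by
  intro s
  induction s with
  | nil =>
    intro v r b _ _ _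
    simp [pvRunsAux, pvDistinct_nil]
  | cons x t ih =>
    intro v r b hsort hge hr
    have hst : t.Pairwise (· ≤ ·) := (List.pairwise_cons.mp hsort).2
    have hxt : ∀ y ∈ t, x ≤ y := (List.pairwise_cons.mp hsort).1
    by_cases hx : x = v
    · subst hx
      rw [pvRunsAux, if_pos rfl]
      rw [ih x (r + 1) b hst hxt (by omega)]
      have hfil : (x :: t).filter (fun y => y ≠ x) = t.filter (fun y => y ≠ x) := by
        simp
      have hcntv : ((x :: t).count x : Int) = (t.count x : Int) + 1 := by
        simp
      rw [hfil]
      have hflush : pvFlush b (some x) (r + 1 + (t.count x : Int))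
          = pvFlush b (some x) (r + ((x :: t).count x : Int)) := by
        rw [hcntv]; ring_nf
      rw [hflush]
      apply PySem.List.foldl_congr_mem
      intro acc u hu
      have hune : u ≠ x := by
        have := (pv_mem_pvDistinct _ u).mp hu
        simp [List.mem_filter] at this
        exact this.2
      have : ((x :: t).count u : Int) = (t.count u : Int) := by
        simp [Ne.symm hune]
      rw [this]
    · -- x ≠ v, and v < x, so v does not occur in x :: t
      have hvx : v < x := lt_of_le_of_ne (hge x (by simp)) (fun h => hx h.symm)
      have hvnot : ∀ y ∈ x :: t, y ≠ v := by
        intro y hy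
        rcases List.mem_cons.mp hy with h | h
        · exact fun he => absurd hvx (by simp [h ▸ he])
        · exact fun he => absurd (hxt y h) (by rw [he]; omega)
      rw [pvRunsAux, if_neg hx]
      rw [ih x 1 (pvFlush b (some v) r) hst hxt (le_refl 1)]
      have hcv : ((x :: t).count v : Int) = 0 := by
        have : (x :: t).count v = 0 := List.count_eq_zero.mpr (fun h => hvnot v h rfl)
        simp [this]
      rw [hcv, add_zero]
      have hfil : (x :: t).filter (fun y => y ≠ v) = x :: t := by
        rw [List.filter_eq_self.mpr]
        intro y hy; simpa using hvnot y hy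
      rw [hfil, pvDistinct_cons]
      rw [List.foldl_cons]
      have hcx : ((x :: t).count x : Int) = 1 + (t.count x : Int) := by
        simp; ring
      have hstep :
          (if 2 ≤ (((x :: t).count x : Int)) then
              max (pvFlush b (some v) r) (x * min (((x :: t).count x : Int)) 3)
            else pvFlush b (some v) r)
          = pvFlush (pvFlush b (some v) r) (some x) (1 + (t.count x : Int)) := by
        simp only [pvFlush, Option.getD_some]; rw [hcx]
      rw [hstep]
      apply PySem.List.foldl_congr_mem
      intro acc u hu
      have hune : u ≠ x := by
        have := (pv_mem_pvDistinct _ u).mp hu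
        simp [List.mem_filter] at this
        exact this.2
      have : ((x :: t).count u : Int) = (t.count u : Int) := by
        simp [Ne.symm hune]
      rw [this]

-- B's scan over the full sorted list
lemma pv_scan_eq (s : List Int) (hs : s.Pairwise (· ≤ ·)) :
    pvBFinal s
    = (pvDistinct s).foldl
        (fun b u => if 2 ≤ ((s.count u : Int)) then max b (u * min ((s.count u : Int)) 3) else b)
        0 := by
  cases s with
  | nil => simp [pvBFinal, pvDistinct_nil, pvFlush]
  | cons x t =>
    unfold pvBFinal
    simp only [List.foldl_cons]
    have h1 : pvBStep (0, none, 0) x = (pvFlush 0 none 0, some x, 1) := by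
      simp [pvBStep]
    rw [h1]
    have h0 : pvFlush 0 none 0 = 0 := by simp [pvFlush]
    rw [h0]
    rw [pv_fold_runsAux t 0 x 1]
    rw [pv_runsAux_eq t x 1 0 ((List.pairwise_cons.mp hs).2) ((List.pairwise_cons.mp hs).1)
        (le_refl 1)]
    rw [pvDistinct_cons, List.foldl_cons]
    have hcx : ((x :: t).count x : Int) = 1 + (t.count x : Int) := by
      simp; ring
    have hstep :
        (if 2 ≤ (((x :: t).count x : Int)) then
            max 0 (x * min (((x :: t).count x : Int)) 3)
          else (0 : Int))
        = pvFlush 0 (some x) (1 + (t.count x : Int)) := by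
      simp only [pvFlush, Option.getD_some]; rw [hcx]
    rw [hstep]
    apply PySem.List.foldl_congr_mem
    intro acc u hu
    have hune : u ≠ x := by
      have := (pv_mem_pvDistinct _ u).mp hu
      simp [List.mem_filter] at this
      exact this.2
    have : ((x :: t).count u : Int) = (t.count u : Int) := by
      simp [Ne.symm hune]
    rw [this]

theorem func_eq_alt (args_0 : String) : func args_0 = func_alt args_0 := by
  unfold func func_alt
  cases hm : (PySem.Str.split₀ args_0).mapM PySem.Int.ofStr? with
  | none => rfl
  | some mat =>
    simp only
    -- reduce B's lets to the applied form (zeta is definitional)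
    show _ = [(PySem.List.sorted mat (fun x => x) false).sum
        - pvBFinal (PySem.List.sorted mat (fun x => x) false)]
    -- A side, as in the dictionary proof
    rw [pv_build_eq mat]
    rw [pv_sat_fold mat (PySem.Dict.counter mat).keys (PySem.Dict.counter mat) [0]
        (PySem.Dict.nodup_keys_counter mat)
        (fun j _ => PySem.Dict.getD_counter mat j)]
    rw [pv_cons_fold mat _ 0 []]
    rw [PySem.List.max?_id_cons]
    simp only
    -- B side
    set s := PySem.List.sorted mat (fun x => x) false with hsdef
    have hperm : s.Perm mat := PySem.List.sorted_perm _ _ _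
    have hsort : s.Pairwise (· ≤ ·) := by
      simpa using PySem.List.sorted_pairwise mat (fun x => x)
    rw [pv_scan_eq s hsort]
    have hsum : s.sum = mat.sum := hperm.sum_eq
    rw [hsum]
    congr 2
    rw [pv_max_fold mat _ 0 []]
    simp only [List.foldl_nil]
    rw [PySem.Dict.keys_counter]
    -- counts agree and the two distinct lists are permutations of each other
    have hcnt : ∀ u : Int, s.count u = mat.count u := fun u => hperm.count_eq u
    have hfun :
        (fun (b u : Int) =>
            if 2 ≤ ((s.count u : Int)) then max b (u * min ((s.count u : Int)) 3) else b)
        = pvStep mat := by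
      funext b u
      rw [pvStep, hcnt u]
    rw [hfun]
    have hpd : (PySem.Set.ofList mat).Perm (pvDistinct s) := by
      refine (List.perm_ext_iff_of_nodup (PySem.Set.nodup_ofList mat)
        (pv_nodup_pvDistinct s)).mpr ?_
      intro u
      rw [pv_mem_pvDistinct, PySem.Set.mem_ofList, hperm.mem_iff]
    exact @List.Perm.foldl_eq _ _ (pvStep mat) _ _ (pv_step_rc mat) hpd 0

-- ===== VERDICT (by name: the statement is the Claim_ definition above) =====
theorem func_spec : Claim_equal_func := by
  intro args_0 _ _
  unfold Spec_func
  exact func_eq_alt args_0
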